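-- pv_equiv track=rewrite | github.com/PanOscar/MaturaInf | Maturka/stara/mat2017/4.py | cykl
-- ===== SOURCE A (Python) =====
-- def cykl(x):
--     slowa = 0
--     mroz = 0
--     roz = 0
--     jakie = ""
--     for i in range(len(x)):
--         if len(x[i]) %2 == 0:
--             granica = 0
--             A = []
--             B = []
--             for j in range(len(x[i])):
--                 if granica < len(x[i])/2:
--                     A.append(x[i][j])
--                 else:
--                     B.append(x[i][j])
--                 granica += 1
--             if A == B:
--                 roz = len(x[i])
--                 slowa +=1
--             if roz > mroz:
--                 jakie = x[i]
--                 mroz = roz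
--     return mroz,slowa,jakie
-- ===== SOURCE B (Python) =====
-- def cykl(x):
--     eq = [w for w in x if len(w) % 2 == 0 and w[:len(w)//2] == w[len(w)//2:]]
--     slowa = len(eq)
--     mroz = max((len(w) for w in eq), default=0)
--     jakie = next((w for w in eq if len(w) == mroz), "")
--     return mroz, slowa, jakie
-- ===== Notes on version B (the rewrite author's own statement) =====
-- stated objective: simpler
-- what changed: Replaces A's single stateful scan (with persistent roz and a char-by-char counter loop splitting each word) by a slice-based filter of half-equal words followed by three plain aggregations: len, max with default 0, and next-with-default for the first word of maximal length.
import Mathlib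
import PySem

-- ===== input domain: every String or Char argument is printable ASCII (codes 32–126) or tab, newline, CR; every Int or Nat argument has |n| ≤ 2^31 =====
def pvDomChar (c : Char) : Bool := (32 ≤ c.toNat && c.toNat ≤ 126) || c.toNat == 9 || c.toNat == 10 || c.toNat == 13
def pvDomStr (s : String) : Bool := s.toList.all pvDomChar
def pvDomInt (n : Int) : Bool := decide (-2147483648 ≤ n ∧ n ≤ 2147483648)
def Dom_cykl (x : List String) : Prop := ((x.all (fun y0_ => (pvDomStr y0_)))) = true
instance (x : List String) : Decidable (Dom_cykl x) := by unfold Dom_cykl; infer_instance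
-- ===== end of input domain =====

-- B replaces A's single running-state scan by a filter of half-equal words plus three plain
-- aggregations (count, max length, first word of that length); same behaviour, simpler shape.

-- ===== PORT A =====
-- inner loop 'for j in range(len(w)): if granica < len(w)/2: A.append … else B.append …; granica += 1'
-- (Python compares the int granica with the float len(w)/2; for integers 'granica < n/2' ⟺ '2*granica < n', exact)
def cyklInner (n : Nat) : List Char → Nat × List Char × List Char → Nat × List Char × List Char
  | [], st => st
  | c :: cs, (g, A, B) =>
    cyklInner n cs (if 2 * g < n then (g + 1, A ++ [c], B) else (g + 1, A, B ++ [c]))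

def cyklLoop : List String → Int × Int × Int × String → Int × Int × Int × String
  | [], st => st
  | w :: ws, (slowa, mroz, roz, jakie) =>
    if w.toList.length % 2 == 0 then
      let r := cyklInner w.toList.length w.toList (0, [], [])
      let A := r.2.1
      let B := r.2.2
      let roz' := if A == B then (w.toList.length : Int) else roz
      let slowa' := if A == B then slowa + 1 else slowa
      let mroz' := if mroz < roz' then roz' else mroz
      let jakie' := if mroz < roz' then w else jakie
      cyklLoop ws (slowa', mroz', roz', jakie')
    else cyklLoop ws (slowa, mroz, roz, jakie)

def cykl (x : List String) : Int × Int × String :=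
  let r := cyklLoop x (0, 0, 0, "")
  (r.2.1, r.1, r.2.2.2)

-- ===== PORT B =====
-- 'len(w) % 2 == 0 and w[:len(w)//2] == w[len(w)//2:]'
def cyklHalves (w : String) : Bool :=
  let l := w.toList
  let h : Int := PySem.Int.floordiv (l.length : Int) 2
  (l.length % 2 == 0) && (PySem.List.slice l none (some h) == PySem.List.slice l (some h) none)

def cykl_alt (x : List String) : Int × Int × String :=
  let eq := x.filter cyklHalves
  let slowa : Int := eq.length
  let mroz : Int := PySem.List.maxD (eq.map (fun w => (w.toList.length : Int))) (fun y => y) 0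
  let jakie : String := (eq.find? (fun w => (w.toList.length : Int) == mroz)).getD ""
  (mroz, slowa, jakie)

-- ===== PRECONDITION & SPEC =====
def Spec_cykl (x : List String) (out : Int × Int × String) : Prop := out = cykl_alt x
instance (x : List String) (out : Int × Int × String) : Decidable (Spec_cykl x out) := by unfold Spec_cykl; infer_instance

-- ===== CLAIM (what is proved, stated in full; the proofs are below) =====
def Claim_equal_cykl : Prop := ∀ (x : List String), Dom_cykl x → Spec_cykl x (cykl x)

-- ===== LEMMAS AND PROOFS =====

theorem cyklInner_eq (l : List Char) (n : Nat) : ∀ (g : Nat) (A B : List Char),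
    cyklInner n l (g, A, B) =
      (g + l.length, A ++ l.take ((n + 1 - 2 * g) / 2), B ++ l.drop ((n + 1 - 2 * g) / 2)) := by
  induction l with
  | nil => intro g A B; simp [cyklInner]
  | cons c cs ih =>
    intro g A B
    by_cases h : 2 * g < n
    · have ht : (n + 1 - 2 * g) / 2 = (n + 1 - 2 * (g + 1)) / 2 + 1 := by omega
      simp only [cyklInner, if_pos h, ih]
      rw [ht]
      simp
      omega
    · have ht : (n + 1 - 2 * g) / 2 = 0 := by omega
      have ht' : (n + 1 - 2 * (g + 1)) / 2 = 0 := by omega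
      simp only [cyklInner, if_neg h, ih, ht, ht']
      simp
      omega

theorem cyklInner_even (w : String) (h : w.toList.length % 2 = 0) :
    cyklInner w.toList.length w.toList (0, [], []) =
      (w.toList.length, w.toList.take (w.toList.length / 2), w.toList.drop (w.toList.length / 2)) := by
  rw [cyklInner_eq, show (w.toList.length + 1 - 2 * 0) / 2 = w.toList.length / 2 from by omega]
  simp only [Nat.zero_add, List.nil_append]

theorem cyklHalves_iff (w : String) (h : w.toList.length % 2 = 0) :
    cyklHalves w = true ↔
      w.toList.take (w.toList.length / 2) = w.toList.drop (w.toList.length / 2) := by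
  have hfd : PySem.Int.floordiv ((w.toList.length : Nat) : Int) 2 = ((w.toList.length / 2 : Nat) : Int) := by
    rw [PySem.Int.floordiv_eq_ediv_of_pos (by norm_num)]; omega
  simp only [cyklHalves, hfd, PySem.List.slice_to_natCast, PySem.List.slice_from_natCast]
  rw [show (w.toList.length % 2 == 0) = true from beq_iff_eq.mpr h]
  simp only [Bool.true_and, beq_iff_eq]

theorem maxD_eq_foldl (l : List Int) (h : ∀ a ∈ l, 0 ≤ a) :
    PySem.List.maxD l (fun y => y) 0 = l.foldl max 0 := by
  cases l with
  | nil => simp [PySem.List.maxD, PySem.List.max?]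
  | cons a t =>
    have ha : max 0 a = a := by
      have := h a (by simp)
      omega
    rw [PySem.List.maxD, PySem.List.max?_id_cons, Option.getD_some, List.foldl_cons, ha]

theorem foldl_max_attained (f : String → Int) (l : List String) : ∀ (i : Int),
    l.foldl (fun a w => max a (f w)) i = i ∨
      ∃ w ∈ l, f w = l.foldl (fun a w => max a (f w)) i := by
  induction l with
  | nil => intro i; simp
  | cons a t ih =>
    intro i
    rcases ih (max i (f a)) with h | ⟨w, hw, hfw⟩
    · simp only [List.foldl_cons, h]
      by_cases hle : f a ≤ i
      · left; omega
      · right; exact ⟨a, by simp, by omega⟩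

    · right; exact ⟨w, by simp [hw], by simpa using hfw⟩

theorem cyklLoop_eq (ws : List String) : ∀ (s m r : Int) (j : String), r ≤ m → 0 ≤ m →
    cyklLoop ws (s, m, r, j) =
      (s + ((ws.filter cyklHalves).length : Int),
       (ws.filter cyklHalves).foldl (fun a w => max a ((w.toList.length : Int))) m,
       (ws.filter cyklHalves).foldl (fun _ w => ((w.toList.length : Int))) r,
       if m < (ws.filter cyklHalves).foldl (fun a w => max a ((w.toList.length : Int))) m then
         ((ws.filter cyklHalves).find? (fun w => (w.toList.length : Int) ==
           (ws.filter cyklHalves).foldl (fun a w => max a ((w.toList.length : Int))) m)).getD j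
       else j) := by
  induction ws with
  | nil =>
    intro s m r j _ _
    simp [cyklLoop]
  | cons w t ih =>
    intro s m r j hrm hm
    by_cases hev : w.toList.length % 2 = 0
    · have hinner := cyklInner_even w hev
      by_cases hh : cyklHalves w = true
      · -- w passes the filter
        have htd : w.toList.take (w.toList.length / 2) = w.toList.drop (w.toList.length / 2) :=
          (cyklHalves_iff w hev).mp hh
        have hL : (0 : Int) ≤ (w.toList.length : Int) := by positivity
        simp only [cyklLoop, hev, beq_self_eq_true, if_pos, hinner, htd]
        simp only [List.filter_cons, hh, if_pos]
        set L : Int := (w.toList.length : Int) with hLdef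
        set F := t.filter cyklHalves with hF
        by_cases hLm : m < L
        · simp only [if_pos hLm]
          rw [ih (s + 1) L L w (le_refl L) (le_trans hm (le_of_lt hLm))]
          have hmax : max m L = L := by omega
          simp only [Prod.mk.injEq]
          refine ⟨by simp only [List.length_cons]; push_cast; ring,
            by simp only [List.foldl_cons, ← hLdef, hmax],
            by simp only [List.foldl_cons, ← hLdef], ?_⟩
          -- jakie component
          set M := F.foldl (fun a w => max a ((w.toList.length : Int))) L with hM
          have hLM : L ≤ M := (PySem.List.le_foldl_max (F.map (fun w => (w.toList.length : Int))) L).1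
            |>.trans_eq (by rw [List.foldl_map])
          have hMtot : (List.foldl (fun a w => max a ((w.toList.length : Int))) m (w :: F)) = M := by
            simp only [List.foldl_cons, ← hLdef, hmax, ← hM]
          rw [hMtot]
          have hcond : m < M := lt_of_lt_of_le hLm hLM
          rw [if_pos hcond]
          by_cases hLeqM : L = M
          · -- w itself attains the max: find? hits w first
            have hcons : (List.find? (fun w => ((w.toList.length : Int)) == M) (w :: F)) = some w := by
              rw [List.find?_cons_of_pos]
              simp only [← hLdef]
              exact beq_iff_eq.mpr hLeqM
            rw [if_neg (show ¬ L < M from by omega), hcons]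
            rfl
          · have hLltM : L < M := lt_of_le_of_ne hLM hLeqM
            rw [if_pos hLltM]
            have hfind : (F.find? (fun w => ((w.toList.length : Int)) == M)).isSome := by
              rcases foldl_max_attained (fun w => (w.toList.length : Int)) F L with hc | ⟨y, hy, hfy⟩
              · rw [← hM] at hc; omega
              · rw [List.find?_isSome]
                exact ⟨y, hy, beq_iff_eq.mpr (hfy.trans hM.symm)⟩
            have hstep : (List.find? (fun w => ((w.toList.length : Int)) == M) (w :: F)) =
                F.find? (fun w => ((w.toList.length : Int)) == M) := by
              rw [List.find?_cons_of_neg]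
              simp only [← hLdef, beq_iff_eq]
              omega
            rw [hstep]
            obtain ⟨y, hy⟩ := Option.isSome_iff_exists.mp hfind
            rw [hy]
            rfl
        · simp only [if_neg hLm]
          rw [ih (s + 1) m L j (by omega) hm]
          have hmax : max m L = m := by omega
          simp only [Prod.mk.injEq]
          refine ⟨by simp only [List.length_cons]; push_cast; ring,
            by simp only [List.foldl_cons, ← hLdef, hmax],
            by simp only [List.foldl_cons, ← hLdef], ?_⟩
          set M := F.foldl (fun a w => max a ((w.toList.length : Int))) m with hM
          have hMtot : (List.foldl (fun a w => max a ((w.toList.length : Int))) m (w :: F)) = M := by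
            simp only [List.foldl_cons, ← hLdef, hmax, ← hM]
          rw [hMtot]
          by_cases hcond : m < M
          · rw [if_pos hcond, if_pos hcond]
            have hstep : (List.find? (fun w => ((w.toList.length : Int)) == M) (w :: F)) =
                F.find? (fun w => ((w.toList.length : Int)) == M) := by
              rw [List.find?_cons_of_neg]
              simp only [← hLdef, beq_iff_eq]
              omega
            rw [hstep]
          · rw [if_neg hcond, if_neg hcond]
      · -- even but halves differ: A ≠ B, state unchanged
        have htd : ¬ (w.toList.take (w.toList.length / 2) = w.toList.drop (w.toList.length / 2)) :=
          fun hc => hh ((cyklHalves_iff w hev).mpr hc)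
        simp only [cyklLoop, hev, beq_self_eq_true, if_pos, hinner]
        have hAB : ((w.toList.take (w.toList.length / 2)) == (w.toList.drop (w.toList.length / 2))) = false := by
          rw [beq_eq_false_iff_ne]
          simpa using htd
        simp only [hAB, Bool.false_eq_true, if_false]
        have : ¬ (m < r) := by omega
        simp only [this, if_false]
        rw [ih s m r j hrm hm]
        simp [hh]
    · -- odd length: skipped entirely, and cyklHalves w = false
      have hh : cyklHalves w = false := by
        have hev3 : ¬ (w.length % 2 = 0) := by simpa using hev
        simp [cyklHalves, hev3]
      have hev' : (w.toList.length % 2 == 0) = false := by simpa using hev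
      simp only [cyklLoop, hev', Bool.false_eq_true, if_false]
      rw [ih s m r j hrm hm]
      simp [hh]

theorem string_len_zero (w : String) (h : w.toList.length = 0) : w = "" :=
  String.toList_eq_nil_iff.mp (List.eq_nil_of_length_eq_zero h)

-- ===== VERDICT (by name: the statement is the Claim_ definition above) =====
theorem cykl_spec : Claim_equal_cykl := by
  unfold Claim_equal_cykl Spec_cykl
  intro x _
  have hmaxD : PySem.List.maxD ((x.filter cyklHalves).map (fun w => (w.toList.length : Int))) (fun y => y) 0
      = (x.filter cyklHalves).foldl (fun a w => max a ((w.toList.length : Int))) 0 := by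
    rw [maxD_eq_foldl _ (by intro a ha; simp at ha; obtain ⟨y, _, hy⟩ := ha; omega), List.foldl_map]
  have hM0 : (0 : Int) ≤ (x.filter cyklHalves).foldl (fun a w => max a ((w.toList.length : Int))) 0 :=
    ((PySem.List.le_foldl_max ((x.filter cyklHalves).map (fun w => (w.toList.length : Int))) 0).1).trans_eq
      (by rw [List.foldl_map])
  simp only [cykl, cykl_alt, cyklLoop_eq x 0 0 0 "" (le_refl 0) (le_refl 0), hmaxD, Prod.mk.injEq]
  refine ⟨by trivial, by simp, ?_⟩
  by_cases hc : (0 : Int) < (x.filter cyklHalves).foldl (fun a w => max a ((w.toList.length : Int))) 0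
  · rw [if_pos hc]
  · rw [if_neg hc]
    have hMz : (x.filter cyklHalves).foldl (fun a w => max a ((w.toList.length : Int))) 0 = 0 := by omega
    rw [hMz]
    cases hfind : (x.filter cyklHalves).find? (fun w => ((w.toList.length : Int)) == (0 : Int)) with
    | none => simp
    | some y =>
      have hsome := List.find?_some hfind
      have hy : y = "" := string_len_zero y (by have := beq_iff_eq.mp hsome; omega)
      simp [hy]
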